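-- pv_equiv track=rewrite | github.com/lab-paper-code/FineCite | finecite/data_processing/data_processor.py | _convert_to_iob
-- ===== SOURCE A (Python) =====
-- def _convert_to_iob(context: list, num_labels: int):
--     prev=0
--     for i in range(len(context)):
--         l = context[i]
--         if prev != 0 and l == prev:
--             context[i] = l + num_labels
--         prev = l
--     return context
-- ===== SOURCE B (Python) =====
-- def _convert_to_iob(context: list, num_labels: int):
--     # Run-based rewrite: find each maximal run of equal values, then bulk-mark
--     # the tail of every nonzero run as "inside" (value + num_labels).
--     # Mutates context in place and returns the same list, like the original.
--     i = 0
--     n = len(context)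
--     while i < n:
--         v = context[i]
--         j = i + 1
--         while j < n and context[j] == v:
--             j += 1
--         if v != 0:
--             for k in range(i + 1, j):
--                 context[k] = v + num_labels
--         i = j
--     return context
-- ===== Notes on version B (the rewrite author's own statement) =====
-- stated objective: alternative
-- what changed: Replaces the element-wise prev-comparison pass with a run-based pass: an outer loop finds each maximal run of equal values and bulk-rewrites the run's tail (for nonzero runs) with value + num_labels.
import Mathlib
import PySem

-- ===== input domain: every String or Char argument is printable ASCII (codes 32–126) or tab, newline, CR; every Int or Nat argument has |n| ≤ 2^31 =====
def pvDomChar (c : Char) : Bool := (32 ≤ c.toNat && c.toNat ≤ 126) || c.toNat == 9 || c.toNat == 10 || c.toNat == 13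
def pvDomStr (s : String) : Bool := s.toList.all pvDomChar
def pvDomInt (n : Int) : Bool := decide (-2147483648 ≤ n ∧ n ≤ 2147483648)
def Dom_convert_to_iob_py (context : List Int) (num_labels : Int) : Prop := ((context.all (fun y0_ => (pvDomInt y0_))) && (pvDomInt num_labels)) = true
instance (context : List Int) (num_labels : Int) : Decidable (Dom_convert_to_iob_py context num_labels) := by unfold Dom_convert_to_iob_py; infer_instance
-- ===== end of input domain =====

-- B mutates context in place exactly like A; the equivalence proved here is about the return value.
-- B is a run-based rewrite (alternative, same O(n) cost), not faster.

-- ===== PORT A =====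
-- A: single pass keeping the previously read (original) value `prev`;
-- an element equal to a nonzero prev becomes l + num_labels.
def convA (prev num : Int) : List Int → List Int
  | [] => []
  | l :: rest =>
    (if prev ≠ 0 ∧ l = prev then l + num else l) :: convA l num rest

def convert_to_iob_py (context : List Int) (num_labels : Int) : List Int :=
  convA 0 num_labels context

-- ===== PORT B =====
-- B: outer loop over maximal runs; the tail of a nonzero run is bulk-rewritten to v + num.
def convB (num : Int) : List Int → List Int
  | [] => []
  | v :: rest =>
    let grp := rest.takeWhile (· == v)
    let rest' := rest.dropWhile (· == v)
    (v :: (if v ≠ 0 then grp.map (· + num) else grp)) ++ convB num rest'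
termination_by xs => xs.length
decreasing_by
  have := List.length_dropWhile_le (fun x => x == v) rest
  simp only [List.length_cons]
  omega

def convert_to_iob_py_alt (context : List Int) (num_labels : Int) : List Int :=
  convB num_labels context

-- ===== PRECONDITION & SPEC =====
def Spec_convert_to_iob_py (context : List Int) (num_labels : Int) (out : List Int) : Prop := out = convert_to_iob_py_alt context num_labels
instance (context : List Int) (num_labels : Int) (out : List Int) : Decidable (Spec_convert_to_iob_py context num_labels out) := by unfold Spec_convert_to_iob_py; infer_instance

-- ===== CLAIM (what is proved, stated in full; the proofs are below) =====
def Claim_equal_convert_to_iob_py : Prop := ∀ (context : List Int) (num_labels : Int), Dom_convert_to_iob_py context num_labels → Spec_convert_to_iob_py context num_labels (convert_to_iob_py context num_labels)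

-- ===== LEMMAS AND PROOFS =====

-- Inside a run of v's, A rewrites every element (prev = v throughout, since prev
-- is the original read value), and resumes with prev = v on the rest.
lemma convA_run (num v : Int) (ys : List Int) :
    convA v num ys
      = (ys.takeWhile (· == v)).map (fun l => if v ≠ 0 then l + num else l)
          ++ convA v num (ys.dropWhile (· == v)) := by
  induction ys with
  | nil => simp [convA]
  | cons y rest ih =>
    by_cases h : y = v
    · rw [h]
      by_cases hv : v = 0
      · simpa [convA, hv] using ih
      · simpa [convA, hv] using ih
    · simp [convA, h]

-- When the head differs from prev (or prev = 0), A behaves like B's fresh run start.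
lemma convA_eq_convB (num : Int) : ∀ n (ys : List Int) (p : Int),
    ys.length ≤ n → ¬ (p ≠ 0 ∧ ys.head? = some p) → convA p num ys = convB num ys := by
  intro n
  induction n with
  | zero =>
    intro ys p hlen _
    have : ys = [] := List.eq_nil_of_length_eq_zero (Nat.le_zero.mp hlen)
    subst this; simp [convA, convB]
  | succ n ih =>
    intro ys p hlen hp
    cases ys with
    | nil => simp [convA, convB]
    | cons y rest =>
      have hcond : ¬ (p ≠ 0 ∧ y = p) := by
        intro ⟨h1, h2⟩; exact hp ⟨h1, by simp [h2]⟩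
      have hstep : convA p num (y :: rest) = y :: convA y num rest := by
        simp [convA, hcond]
      rw [hstep, convA_run]
      have hdrop : ¬ (y ≠ 0 ∧ (rest.dropWhile (· == y)).head? = some y) := by
        rintro ⟨-, h2⟩
        have := List.head?_dropWhile_not (p := (· == y)) (l := rest)
        rw [h2] at this
        simp at this
      have hlen' : (rest.dropWhile (· == y)).length ≤ n := by
        have := List.length_dropWhile_le (fun x => x == y) rest
        simp at hlen; omega
      rw [ih _ _ hlen' hdrop]
      show _ = convB num (y :: rest)
      rw [convB]
      by_cases hy : y = 0
      · subst hy
        simp only [ne_eq, not_true_eq_false, if_false]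
        simp
      · simp [hy]

-- ===== VERDICT (by name: the statement is the Claim_ definition above) =====
theorem convert_to_iob_py_spec : Claim_equal_convert_to_iob_py := by
  intro context num_labels _
  show convert_to_iob_py context num_labels = convert_to_iob_py_alt context num_labels
  unfold convert_to_iob_py convert_to_iob_py_alt
  exact convA_eq_convB num_labels context.length context 0 le_rfl (by simp)
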